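-- pv_equiv track=rewrite | github.com/SnowflakeTech/AI-Powered-Learning-System | sat_question_generator.py | _unique_choices
-- ===== SOURCE A (Python) =====
-- from typing import List, Tuple, Dict
--
-- def _unique_choices(correct: int, distractors: List[int]) -> List[int]:
--     """Return up to 3 unique distractors not equal to correct."""
--     seen = set([correct])
--     uniq = []
--     for d in distractors:
--         if d not in seen:
--             uniq.append(d)
--             seen.add(d)
--         if len(uniq) == 3:
--             break
--     # If still short, pad with nearby numbers
--     t = correct
--     k = 1
--     while len(uniq) < 3:
--         for cand in (t + k, t - k):
--             if cand not in seen: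
--                 uniq.append(cand)
--                 seen.add(cand)
--                 if len(uniq) == 3:
--                     break
--         k += 1
--     return uniq
-- ===== SOURCE B (Python) =====
-- from typing import List
--
-- def _unique_choices(correct: int, distractors: List[int]) -> List[int]:
--     """Return up to 3 unique distractors not equal to correct.
--
--     One dedup-and-take-3 pass over a single candidate stream: the given
--     distractors followed by correct+-1, correct+-2, correct+-3.  Three
--     offsets always suffice: at most two of those six values can already
--     be taken (uniq holds fewer than 3 values when padding is needed).
--     """
--     nearby = [correct + s * k for k in (1, 2, 3) for s in (1, -1)]
--     seen = {correct}
--     uniq = []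
--     for cand in distractors + nearby:
--         if cand in seen:
--             continue
--         seen.add(cand)
--         uniq.append(cand)
--         if len(uniq) == 3:
--             break
--     return uniq
-- ===== Notes on version B (the rewrite author's own statement) =====
-- stated objective: simpler
-- what changed: A's two-phase structure (scan distractors with a break, then a while-loop spiralling outward from correct to pad) is replaced by one dedup-and-take-3 pass over a single concatenated candidate list distractors + [c+1,c-1,c+2,c-2,c+3,c-3] (three offsets provably always suffice).
import Mathlib
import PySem

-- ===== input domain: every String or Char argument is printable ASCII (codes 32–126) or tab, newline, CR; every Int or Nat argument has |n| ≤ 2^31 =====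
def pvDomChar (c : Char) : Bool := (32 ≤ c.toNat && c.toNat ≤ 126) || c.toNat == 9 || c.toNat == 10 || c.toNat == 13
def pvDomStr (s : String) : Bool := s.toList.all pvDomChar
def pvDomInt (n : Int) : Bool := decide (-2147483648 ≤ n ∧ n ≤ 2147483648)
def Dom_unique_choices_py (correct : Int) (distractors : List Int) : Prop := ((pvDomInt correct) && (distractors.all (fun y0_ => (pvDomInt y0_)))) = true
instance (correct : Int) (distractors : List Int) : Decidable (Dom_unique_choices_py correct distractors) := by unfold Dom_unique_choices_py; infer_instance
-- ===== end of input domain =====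

-- B replaces A's two-phase scan-then-spiral-pad with a single dedup-and-take-3 pass
-- over the concatenated candidate list distractors ++ [c±1, c±2, c±3] (objective: simpler).

-- ===== PORT A =====
-- first for-loop of A: 'for d in distractors: if d not in seen: append/add; if len==3: break'
def aLoop (seen : PySem.Set Int) (uniq : List Int) : List Int → PySem.Set Int × List Int
  | [] => (seen, uniq)
  | d :: rest =>
      let st := if seen.contains d then (seen, uniq) else (seen.add d, uniq ++ [d])
      if st.2.length == 3 then st else aLoop st.1 st.2 rest

-- A's while-loop, transcribed with a fuel of 3 iterations to make it total in Lean.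
-- Each iteration processes the pair (t+k, t-k); Python's inner 'break' fires only after
-- an append makes len(uniq)==3 — since the while guard gives len<3 at entry, that is the
-- same as checking st1.2.length == 3 here.  3 iterations suffice on every input: when the
-- while-loop is entered uniq has < 3 entries, so at most 2 of the six candidates are
-- already in seen (they all differ from correct), and the loop fills uniq to 3.
def aPad (t : Int) (seen : PySem.Set Int) (uniq : List Int) (k : Int) : Nat → List Int
  | 0 => uniq
  | f + 1 =>
      if uniq.length < 3 then
        let st1 := if seen.contains (t + k) then (seen, uniq) else (seen.add (t + k), uniq ++ [t + k])
        if st1.2.length == 3 then st1.2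
        else
          let st2 := if st1.1.contains (t - k) then st1 else (st1.1.add (t - k), st1.2 ++ [t - k])
          aPad t st2.1 st2.2 (k + 1) f
      else uniq

def unique_choices_py (correct : Int) (distractors : List Int) : List Int :=
  let st := aLoop (PySem.Set.ofList [correct]) [] distractors
  aPad correct st.1 st.2 1 3

-- ===== PORT B =====
-- Source B's single for-loop: skip seen candidates, otherwise take, stop at 3
def bLoop (seen : PySem.Set Int) (uniq : List Int) : List Int → List Int
  | [] => uniq
  | c :: rest =>
      if seen.contains c then bLoop seen uniq rest
      else
        let seen' := seen.add c
        let uniq' := uniq ++ [c]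
        if uniq'.length == 3 then uniq' else bLoop seen' uniq' rest

def unique_choices_py_alt (correct : Int) (distractors : List Int) : List Int :=
  let nearby := [correct + 1, correct - 1, correct + 2, correct - 2, correct + 3, correct - 3]
  bLoop (PySem.Set.ofList [correct]) [] (distractors ++ nearby)

-- ===== PRECONDITION & SPEC =====
def Spec_unique_choices_py (correct : Int) (distractors : List Int) (out : List Int) : Prop := out = unique_choices_py_alt correct distractors
instance (correct : Int) (distractors : List Int) (out : List Int) : Decidable (Spec_unique_choices_py correct distractors out) := by unfold Spec_unique_choices_py; infer_instance

-- ===== CLAIM (what is proved, stated in full; the proofs are below) =====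
def Claim_equal_unique_choices_py : Prop := ∀ (correct : Int) (distractors : List Int), Dom_unique_choices_py correct distractors → Spec_unique_choices_py correct distractors (unique_choices_py correct distractors)

-- ===== LEMMAS AND PROOFS =====

-- B's loop returns the uniq component of A's loop (both break at 3), as long as we start short
theorem bLoop_eq_aLoop (l : List Int) : ∀ (s : PySem.Set Int) (u : List Int),
    u.length < 3 → bLoop s u l = (aLoop s u l).2 := by
  induction l with
  | nil => intro s u _; rfl
  | cons d rest ih =>
    intro s u hu
    by_cases hc : s.contains d = true
    · simp only [bLoop, aLoop, hc, if_pos]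
      have h3 : ¬ (u.length == 3) = true := by simp; omega
      simp only [h3, Bool.false_eq_true, if_false]
      exact ih s u hu
    · simp only [bLoop, aLoop, hc, Bool.false_eq_true, if_false]
      by_cases h3 : ((u ++ [d]).length == 3) = true
      · simp only [h3, if_true]
      · simp only [h3, Bool.false_eq_true, if_false]
        exact ih _ _ (by simp at h3 ⊢; omega)

-- length of aLoop's accumulator never exceeds 3 when it starts below 3
theorem aLoop_len_le (l : List Int) : ∀ (s : PySem.Set Int) (u : List Int),
    u.length < 3 → (aLoop s u l).2.length ≤ 3 := by
  induction l with
  | nil => intro s u hu; simp only [aLoop]; omega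
  | cons d rest ih =>
    intro s u hu
    by_cases hc : s.contains d = true
    · have h3 : ¬ (u.length == 3) = true := by simp; omega
      simp only [aLoop, hc, if_true, h3, Bool.false_eq_true, if_false]
      exact ih s u hu
    · simp only [aLoop, hc, Bool.false_eq_true, if_false]
      by_cases h3 : ((u ++ [d]).length == 3) = true
      · simp only [h3, if_true]; simp at h3 ⊢; omega
      · simp only [h3, Bool.false_eq_true, if_false]
        exact ih _ _ (by simp at h3 ⊢; omega)

-- splitting A's break-at-3 loop across an append
theorem aLoop_append (xs : List Int) : ∀ (ys : List Int) (s : PySem.Set Int) (u : List Int),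
    u.length < 3 →
    aLoop s u (xs ++ ys) =
      (let st := aLoop s u xs; if st.2.length == 3 then st else aLoop st.1 st.2 ys) := by
  induction xs with
  | nil =>
    intro ys s u hu
    have h3 : ¬ (u.length == 3) = true := by simp; omega
    simp [aLoop, h3]
  | cons d rest ih =>
    intro ys s u hu
    by_cases hc : s.contains d = true
    · have h3 : ¬ (u.length == 3) = true := by simp; omega
      simp only [List.cons_append, aLoop, hc, if_true, h3, Bool.false_eq_true, if_false]
      exact ih ys s u hu
    · simp only [List.cons_append, aLoop, hc, Bool.false_eq_true, if_false]
      by_cases h3 : ((u ++ [d]).length == 3) = true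
      · simp only [h3, if_true]
      · simp only [h3, Bool.false_eq_true, if_false]
        exact ih ys _ _ (by simp at h3 ⊢; omega)

-- once uniq is full the while-loop does nothing
theorem aPad_full (t : Int) (s : PySem.Set Int) (u : List Int) (k : Int) (f : Nat)
    (h : ¬ u.length < 3) : aPad t s u k f = u := by
  cases f with
  | zero => rfl
  | succ f => simp [aPad, h]

-- A's break-at-3 loop body on a two-element list, written out
theorem aLoop_pair (s : PySem.Set Int) (u : List Int) (a b : Int) :
    aLoop s u [a, b] =
      (let st1 := if s.contains a then (s, u) else (s.add a, u ++ [a])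
       if st1.2.length == 3 then st1
       else if st1.1.contains b then st1 else (st1.1.add b, st1.2 ++ [b])) := by
  simp only [aLoop]
  split_ifs <;> rfl

-- one while-iteration is A's loop body run on the pair [t+k, t-k]
theorem aPad_step (t : Int) (s : PySem.Set Int) (u : List Int) (k : Int) (f : Nat) :
    aPad t s u k (f + 1) =
      (if u.length < 3 then
        (let r := aLoop s u [t + k, t - k];
         if r.2.length == 3 then r.2 else aPad t r.1 r.2 (k + 1) f)
      else u) := by
  by_cases hu : u.length < 3
  · simp only [aPad, hu, if_true, aLoop_pair s u (t + k) (t - k)]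
    by_cases h3 : ((if s.contains (t + k) then (s, u) else (s.add (t + k), u ++ [t + k])).2.length == 3) = true
    · simp only [h3, if_true]
    · simp only [h3, Bool.false_eq_true, if_false]
      by_cases h3' : ((if (if s.contains (t + k) then (s, u) else (s.add (t + k), u ++ [t + k])).1.contains (t - k)
            then (if s.contains (t + k) then (s, u) else (s.add (t + k), u ++ [t + k]))
            else ((if s.contains (t + k) then (s, u) else (s.add (t + k), u ++ [t + k])).1.add (t - k),
                  (if s.contains (t + k) then (s, u) else (s.add (t + k), u ++ [t + k])).2 ++ [t - k])).2.length == 3) = true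
      · simp only [h3', if_true]
        exact aPad_full t _ _ (k + 1) f (by simp only [beq_iff_eq] at h3'; omega)
      · simp only [h3', Bool.false_eq_true, if_false]
  · simp only [aPad, hu, if_false]

-- the fuel-3 while-loop equals A's loop body run over the six nearby candidates
theorem aPad_eq_aLoop_six (t : Int) (s : PySem.Set Int) (u : List Int) (hu : u.length < 3) :
    aPad t s u 1 3 = (aLoop s u [t + 1, t - 1, t + 2, t - 2, t + 3, t - 3]).2 := by
  have split2 : ([t + 1, t - 1, t + 2, t - 2, t + 3, t - 3] : List Int)
      = [t + 1, t - 1] ++ ([t + 2, t - 2] ++ [t + 3, t - 3]) := by simp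
  rw [split2]
  rw [aLoop_append [t + 1, t - 1] _ s u hu]
  rw [show (3 : Nat) = 2 + 1 from rfl, aPad_step]
  simp only [hu, if_true]
  set r1 := aLoop s u [t + 1, t - 1] with hr1
  by_cases h1 : (r1.2.length == 3) = true
  · simp only [h1, if_true]
  · simp only [h1, Bool.false_eq_true, if_false]
    have hr1len : r1.2.length < 3 := by
      have hle := aLoop_len_le [t + 1, t - 1] s u hu
      rw [← hr1] at hle
      simp only [beq_iff_eq] at h1; omega
    rw [aLoop_append [t + 2, t - 2] _ r1.1 r1.2 hr1len]
    rw [show (2 : Nat) = 1 + 1 from rfl, aPad_step]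
    simp only [hr1len, if_true]
    rw [show ((1 : Int) + 1) = 2 from rfl]
    set r2 := aLoop r1.1 r1.2 [t + 2, t - 2] with hr2
    by_cases h2 : (r2.2.length == 3) = true
    · simp only [h2, if_true]
    · simp only [h2, Bool.false_eq_true, if_false]
      have hr2len : r2.2.length < 3 := by
        have hle := aLoop_len_le [t + 2, t - 2] r1.1 r1.2 hr1len
        rw [← hr2] at hle
        simp only [beq_iff_eq] at h2; omega
      rw [show (1 : Nat) = 0 + 1 from rfl, aPad_step]
      simp only [hr2len, if_true]
      rw [show ((2 : Int) + 1) = 3 from rfl]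
      set r3 := aLoop r2.1 r2.2 [t + 3, t - 3] with hr3
      by_cases h3 : (r3.2.length == 3) = true
      · simp only [h3, if_true]
      · simp only [h3, Bool.false_eq_true, if_false]
        rfl

-- ===== VERDICT (by name: the statement is the Claim_ definition above) =====
theorem unique_choices_py_spec : Claim_equal_unique_choices_py := by
  intro correct distractors _
  unfold Spec_unique_choices_py unique_choices_py unique_choices_py_alt
  have h0 : ([] : List Int).length < 3 := by simp
  rw [bLoop_eq_aLoop _ _ _ h0]
  rw [aLoop_append distractors _ _ _ h0]
  set st := aLoop (PySem.Set.ofList [correct]) [] distractors with hst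
  by_cases h3 : (st.2.length == 3) = true
  · simp only [h3, if_true]
    exact aPad_full correct st.1 st.2 1 3 (by simp only [beq_iff_eq] at h3; omega)
  · simp only [h3, Bool.false_eq_true, if_false]
    have hle := aLoop_len_le distractors (PySem.Set.ofList [correct]) [] h0
    rw [← hst] at hle
    exact aPad_eq_aLoop_six correct st.1 st.2 (by simp only [beq_iff_eq] at h3; omega)
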